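-- pv_equiv track=rewrite | github.com/OmGhag/CSCI-544-Assignment | HW3/submissions/utils.py | build_char_vocab
-- ===== SOURCE A (Python) =====
-- def build_char_vocab(sentences):
--     char2idx = {"<PAD>": 0, "<UNK>": 1}
--     for sentence in sentences:
--         for word, tag in sentence:
--             for char in word:
--                 if char not in char2idx:
--                     char2idx[char] = len(char2idx)
--     return char2idx
-- ===== SOURCE B (Python) =====
-- def build_char_vocab(sentences):
--     text = "".join(word for sentence in sentences for word, _tag in sentence)
--     uniq = sorted(set(text), key=text.index)
--     return dict([("<PAD>", 0), ("<UNK>", 1)] + [(c, i) for i, c in enumerate(uniq, 2)])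
-- ===== Notes on version B (the rewrite author's own statement) =====
-- stated objective: alternative
-- what changed: Replaces A's incremental membership-guarded dict pass by a sort-based construction: join all words into one text, sort the character set by first-occurrence index (sorted(set(text), key=text.index)), and build the whole dict in one shot from an assembled pair list.
import Mathlib
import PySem

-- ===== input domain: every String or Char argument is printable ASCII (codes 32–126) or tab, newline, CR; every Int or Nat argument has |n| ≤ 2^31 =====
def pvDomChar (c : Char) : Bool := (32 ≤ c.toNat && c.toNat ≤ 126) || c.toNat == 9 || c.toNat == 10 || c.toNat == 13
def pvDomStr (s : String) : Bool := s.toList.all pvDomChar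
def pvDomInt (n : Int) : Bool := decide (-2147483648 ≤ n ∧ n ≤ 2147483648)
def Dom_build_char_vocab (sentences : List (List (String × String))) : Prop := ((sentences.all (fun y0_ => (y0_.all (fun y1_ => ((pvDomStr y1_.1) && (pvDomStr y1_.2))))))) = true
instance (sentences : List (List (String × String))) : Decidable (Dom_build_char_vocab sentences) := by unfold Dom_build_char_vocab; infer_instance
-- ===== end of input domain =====

-- B replaces A's membership-guarded incremental dict pass by a sort-based construction:
-- join all words, sort the character set by first-occurrence index, build the dict in one
-- shot (objective: alternative; the str.index key makes B O(k·n), not faster).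

-- ===== PORT A =====
-- Python iterates the characters of `word` as length-1 strings; both ports make that explicit
-- with `String.ofList [ch]` over `word.toList` (exact: the dict keys are those 1-char strings).
def cvStep (d : PySem.Dict String Int) (c : String) : PySem.Dict String Int :=
  if d.contains c = false then d.insert c (d.size : Int) else d

def build_char_vocab (sentences : List (List (String × String))) : List (String × Int) :=
  (sentences.foldl (fun d sentence =>
      sentence.foldl (fun d wt =>
        wt.1.toList.foldl (fun d ch => cvStep d (String.ofList [ch])) d) d)
    (PySem.Dict.mk [("<PAD>", 0), ("<UNK>", 1)])).items

-- ===== PORT B =====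
-- `text = "".join(words)` is represented by the list of its characters as 1-char strings
-- (exact: iterating / set() over a str yields 1-char strings, and join concatenates).
def cvText (sentences : List (List (String × String))) : List String :=
  sentences.flatMap (fun sentence =>
    sentence.flatMap (fun wt => wt.1.toList.map (fun ch => String.ofList [ch])))

-- `text.index(c)` for a 1-char string c is the index of c in that character list
-- (exact: a length-1 substring occurs first exactly at its first character position).
def cvIndexKey (text : List String) (c : String) : Int :=
  ((PySem.List.index? text c).getD 0 : Nat)

def build_char_vocab_alt (sentences : List (List (String × String))) : List (String × Int) :=
  let text := cvText sentences
  let uniq := PySem.List.sorted (PySem.Set.ofList text) (cvIndexKey text) false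
  (PySem.Dict.ofList ([("<PAD>", (0 : Int)), ("<UNK>", (1 : Int))] ++
      (PySem.List.enumerate uniq 2).map (fun p => (p.2, p.1)))).items

-- ===== PRECONDITION & SPEC =====
def Spec_build_char_vocab (sentences : List (List (String × String))) (out : List (String × Int)) : Prop := out = build_char_vocab_alt sentences
instance (sentences : List (List (String × String))) (out : List (String × Int)) : Decidable (Spec_build_char_vocab sentences out) := by unfold Spec_build_char_vocab; infer_instance

-- ===== CLAIM (what is proved, stated in full; the proofs are below) =====
def Claim_equal_build_char_vocab : Prop := ∀ (sentences : List (List (String × String))), Dom_build_char_vocab sentences → Spec_build_char_vocab sentences (build_char_vocab sentences)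

-- ===== LEMMAS AND PROOFS =====

-- the seed dict {"<PAD>": 0, "<UNK>": 1}
def cvSeed : PySem.Dict String Int := PySem.Dict.mk [("<PAD>", 0), ("<UNK>", 1)]

lemma cvSeed_not_contains {c : String} (h1 : c ≠ "<PAD>") (h2 : c ≠ "<UNK>") :
    cvSeed.contains c = false := by
  simp [cvSeed, PySem.Dict.contains_mk]
  exact ⟨fun h => h1 h.symm, fun h => h2 h.symm⟩

lemma cvD_keys (cs : List String) :
    ((PySem.List.enumerate (PySem.Set.ofList cs) 2).foldl
        (fun d p => d.insert p.2 p.1) cvSeed).keys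
      = PySem.Set.update cvSeed.keys (PySem.Set.ofList cs) := by
  rw [PySem.Dict.keys_foldl_insert_key (key := Prod.snd) (f := fun d p => p.1)]
  rw [PySem.List.map_snd_enumerate]

lemma cvD_items (cs : List String) (h : ∀ c ∈ cs, cvSeed.contains c = false) :
    ((PySem.List.enumerate (PySem.Set.ofList cs) 2).foldl
        (fun d p => d.insert p.2 p.1) cvSeed).items
      = cvSeed.items ++ (PySem.List.enumerate (PySem.Set.ofList cs) 2).map (fun p => (p.2, p.1)) := by
  rw [PySem.Dict.items_foldl_insert_fresh (k := Prod.snd) (v := Prod.fst)]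
  · intro a ha
    rcases (PySem.List.mem_enumerate_iff _ _ _).mp ha with ⟨k, hk, rfl⟩
    exact h _ ((PySem.Set.mem_ofList _ _).mp (List.getElem_mem hk))
  · rw [PySem.List.map_snd_enumerate]; exact PySem.Set.nodup_ofList cs

-- A's loop equals the enumerate-insertion loop over the first-seen-unique characters
lemma cv_fold_eq (cs : List String) (h : ∀ c ∈ cs, cvSeed.contains c = false) :
    cs.foldl cvStep cvSeed
      = (PySem.List.enumerate (PySem.Set.ofList cs) 2).foldl
          (fun d p => d.insert p.2 p.1) cvSeed := by
  induction cs using List.reverseRecOn with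
  | nil => rfl
  | append_singleton cs c ih =>
    have hcs : ∀ x ∈ cs, cvSeed.contains x = false :=
      fun x hx => h x (List.mem_append_left _ hx)
    have hc : cvSeed.contains c = false := h c (List.mem_append_right _ (by simp))
    rw [List.foldl_append, ih hcs, PySem.Set.ofList_append_singleton]
    by_cases hmem : c ∈ PySem.Set.ofList cs
    · rw [PySem.Set.add_of_mem hmem]
      have hcontains : ((PySem.List.enumerate (PySem.Set.ofList cs) 2).foldl
          (fun d p => d.insert p.2 p.1) cvSeed).contains c = true := by
        rw [PySem.Dict.contains_iff_mem_keys, cvD_keys]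
        exact (PySem.Set.mem_update _ _ _).mpr (Or.inr hmem)
      rw [List.foldl_cons, List.foldl_nil]
      simp only [cvStep]
      rw [if_neg (by simp [hcontains])]
    · rw [PySem.Set.add_of_not_mem hmem, PySem.List.enumerate_append, List.foldl_append,
        PySem.List.enumerate_cons, PySem.List.enumerate_nil, List.foldl_cons, List.foldl_nil]
      have hncontains : ((PySem.List.enumerate (PySem.Set.ofList cs) 2).foldl
          (fun d p => d.insert p.2 p.1) cvSeed).contains c = false := by
        rw [← Bool.not_eq_true, PySem.Dict.contains_iff_mem_keys, cvD_keys]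
        intro hk
        rcases (PySem.Set.mem_update _ _ _).mp hk with hk | hk
        · have : cvSeed.contains c = true := (PySem.Dict.contains_iff_mem_keys _ _).mpr hk
          simp [hc] at this
        · exact hmem hk
      have hsize : ((PySem.List.enumerate (PySem.Set.ofList cs) 2).foldl
          (fun d p => d.insert p.2 p.1) cvSeed).size = 2 + (PySem.Set.ofList cs).length := by
        show (((PySem.List.enumerate (PySem.Set.ofList cs) 2).foldl
          (fun d p => d.insert p.2 p.1) cvSeed)).items.length = _
        rw [cvD_items cs hcs]
        simp [cvSeed, PySem.List.length_enumerate]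
        omega
      simp only [cvStep]
      rw [if_pos hncontains, hsize]
      congr 1

-- a single-character string is never one of the seed keys
lemma cv_singleton_ne_seed (ch : Char) : cvSeed.contains (String.ofList [ch]) = false := by
  apply cvSeed_not_contains <;>
    · intro heq
      have := congrArg String.toList heq
      simp at this

lemma cv_text_seed (sentences : List (List (String × String))) :
    ∀ c ∈ cvText sentences, cvSeed.contains c = false := by
  intro c hc
  rcases List.mem_flatMap.mp hc with ⟨sentence, _, hc⟩
  rcases List.mem_flatMap.mp hc with ⟨wt, _, hc⟩
  rcases List.mem_map.mp hc with ⟨ch, _, rfl⟩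
  exact cv_singleton_ne_seed ch

-- A's triple nested loop is the single fold of cvStep over the flattened character stream
lemma cv_A_flatten (sentences : List (List (String × String))) :
    (sentences.foldl (fun d sentence =>
        sentence.foldl (fun d wt =>
          wt.1.toList.foldl (fun d ch => cvStep d (String.ofList [ch])) d) d) cvSeed)
      = (cvText sentences).foldl cvStep cvSeed := by
  rw [cvText, List.foldl_flatMap]
  congr 1
  funext d sentence
  rw [List.foldl_flatMap]
  congr 1
  funext d wt
  rw [List.foldl_map]

-- the first-seen-unique list is strictly increasing under the first-occurrence key …
lemma cv_pairwise (cs : List String) :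
    (PySem.Set.ofList cs).Pairwise (fun a b => cvIndexKey cs a < cvIndexKey cs b) := by
  induction cs using List.reverseRecOn with
  | nil => exact List.Pairwise.nil
  | append_singleton cs c ih =>
    have hkey : ∀ x ∈ cs, cvIndexKey (cs ++ [c]) x = cvIndexKey cs x := by
      intro x hx
      unfold cvIndexKey
      rw [PySem.List.index?_append_of_mem _ hx]
    rw [PySem.Set.ofList_append_singleton]
    by_cases hmem : c ∈ PySem.Set.ofList cs
    · rw [PySem.Set.add_of_mem hmem]
      refine ih.imp_of_mem ?_
      intro a b ha hb hab
      rw [hkey a ((PySem.Set.mem_ofList _ _).mp ha), hkey b ((PySem.Set.mem_ofList _ _).mp hb)]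
      exact hab
    · have hc : c ∉ cs := fun h => hmem ((PySem.Set.mem_ofList _ _).mpr h)
      rw [PySem.Set.add_of_not_mem hmem]
      rw [List.pairwise_append]
      refine ⟨ih.imp_of_mem ?_, List.pairwise_singleton _ _, ?_⟩
      · intro a b ha hb hab
        rw [hkey a ((PySem.Set.mem_ofList _ _).mp ha), hkey b ((PySem.Set.mem_ofList _ _).mp hb)]
        exact hab
      · intro a ha b hb
        rw [List.mem_singleton] at hb
        subst hb
        have hacs : a ∈ cs := (PySem.Set.mem_ofList _ _).mp ha
        rw [hkey a hacs]
        unfold cvIndexKey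
        rw [PySem.List.index?_append_singleton_self _ _ hc]
        rcases Option.isSome_iff_exists.mp ((PySem.List.index?_isSome_iff _ _).mpr hacs) with ⟨k, hk⟩
        rcases PySem.List.getElem_of_index?_eq_some hk with ⟨hklt, _, _⟩
        rw [hk]
        simp
        omega

-- … so sorting the character set by text.index is the identity on it
lemma cv_sorted_id (cs : List String) :
    PySem.List.sorted (PySem.Set.ofList cs) (cvIndexKey cs) false = PySem.Set.ofList cs :=
  PySem.List.sorted_eq_of_perm_of_pairwise_lt _ _ _ (List.Perm.refl _) (cv_pairwise cs)

-- building dict(pairs) over pairwise-distinct keys keeps the pairs as its items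
lemma cv_ofList_items (pairs : List (String × Int)) (h : (pairs.map Prod.fst).Nodup) :
    (PySem.Dict.ofList pairs).items = pairs := by
  have hd : PySem.Dict.ofList pairs
      = pairs.foldl (fun d p => d.insert p.1 p.2) PySem.Dict.empty := rfl
  rw [hd, PySem.Dict.items_foldl_insert_fresh (k := Prod.fst) (v := Prod.snd)]
  · simp only [show (PySem.Dict.empty : PySem.Dict String Int).items = [] from rfl,
      List.nil_append]
    simp
  · intro a _
    simp
  · exact h

-- ===== VERDICT (by name: the statement is the Claim_ definition above) =====
theorem build_char_vocab_spec : Claim_equal_build_char_vocab := by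
  intro sentences _
  show build_char_vocab sentences = build_char_vocab_alt sentences
  have hseed := cv_text_seed sentences
  unfold build_char_vocab
  simp only [build_char_vocab_alt]
  rw [show PySem.Dict.mk [("<PAD>", (0:Int)), ("<UNK>", 1)] = cvSeed from rfl]
  rw [cv_A_flatten, cv_fold_eq _ hseed, cvD_items _ hseed, cv_sorted_id]
  rw [cv_ofList_items]
  · rfl
  · rw [List.map_append, List.map_map]
    have hsnd : ((PySem.List.enumerate (PySem.Set.ofList (cvText sentences)) 2).map
        (Prod.fst ∘ fun p => (p.2, p.1))) = PySem.Set.ofList (cvText sentences) := by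
      show (PySem.List.enumerate (PySem.Set.ofList (cvText sentences)) 2).map (·.2) = _
      exact PySem.List.map_snd_enumerate _ _
    rw [hsnd]
    refine List.Nodup.append (by decide) (PySem.Set.nodup_ofList _) ?_
    intro x hx hx'
    have hxcs := (PySem.Set.mem_ofList _ _).mp hx'
    have := cv_text_seed sentences x hxcs
    rcases List.mem_pair.mp hx with rfl | rfl <;> simp [cvSeed, PySem.Dict.contains_mk] at this
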